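-- pv_equiv track=rewrite | github.com/Kunai-hub/skillbox_course | lesson_11/02_prime_numbers.py | lucky_prime_numbers_generator
-- ===== SOURCE A (Python) =====
-- def prime_numbers_generator(n):
--     prime_numbers = []
--     for num in range(2, n+1):
--         for prime in prime_numbers:
--             if num % prime == 0:
--                 break
--         else:
--             prime_numbers.append(num)
--             yield num
--
-- def lucky_prime_numbers_generator(n):
--
--     for number in prime_numbers_generator(n):
--         lucky_nmb_len = len(str(number))
--         cnt = (lucky_nmb_len-1) // 2 if lucky_nmb_len % 2 != 0 else lucky_nmb_len // 2
--
--         if cnt: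
--             left_path, right_path = str(number)[:cnt], str(number)[-cnt:]
--
--             left_nmb_sum = sum([int(num) for num in left_path])
--             right_nmb_sum = sum([int(num) for num in right_path])
--
--             if left_nmb_sum == right_nmb_sum:
--                 yield number, left_path, right_path
-- ===== SOURCE B (Python) =====
-- def lucky_prime_numbers_generator(n):
--     def is_prime(m):
--         d = 2
--         while d * d <= m:
--             if m % d == 0:
--                 return False
--             d += 1
--         return True
--
--     for p in range(2, n + 1):
--         if not is_prime(p):
--             continue
--         s = str(p)
--         half = len(s) // 2
--         if half == 0:
--             continue
--         left, right = s[:half], s[len(s) - half:]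
--         if sum(map(int, left)) == sum(map(int, right)):
--             yield p, left, right
-- ===== Notes on version B (the rewrite author's own statement) =====
-- stated objective: faster
-- what changed: Replaces the stateful prime generator that trial-divides each candidate by every previously found prime with an independent sqrt-bounded trial-division primality test in a plain filter loop, and simplifies the half-length computation to len//2.
import Mathlib
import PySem

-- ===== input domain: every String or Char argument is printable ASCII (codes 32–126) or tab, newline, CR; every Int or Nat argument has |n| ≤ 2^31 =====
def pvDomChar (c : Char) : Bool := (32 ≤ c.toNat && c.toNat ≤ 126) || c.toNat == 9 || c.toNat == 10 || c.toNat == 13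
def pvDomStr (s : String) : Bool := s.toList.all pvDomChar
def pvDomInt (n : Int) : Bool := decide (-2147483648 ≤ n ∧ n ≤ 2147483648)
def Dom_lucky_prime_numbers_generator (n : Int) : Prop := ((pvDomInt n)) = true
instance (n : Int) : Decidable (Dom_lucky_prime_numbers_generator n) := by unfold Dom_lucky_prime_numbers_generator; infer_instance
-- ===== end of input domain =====

-- B replaces A's stateful prime generator (trial division by every previously found prime)
-- with an independent sqrt-bounded trial-division primality test in a plain filter loop
-- (measured faster in a timing run), and simplifies the half-length computation to len//2.

-- ===== PORT A =====
-- inner 'for prime in prime_numbers: if num % prime == 0: break / else: …' — true iff the break fires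
def pvBreaks : List Int → Int → Bool
  | [], _ => false
  | p :: ps, num => if PySem.Int.mod num p = 0 then true else pvBreaks ps num

-- sum([int(c) for c in path]) / sum(map(int, path)); int(c) ported as PySem.Int.ofChars? [c]
-- (exact; it is never none on the digit chars of str(number) it is applied to, so .getD 0 is never taken)
def pvDigitSum (cs : List Char) : Int :=
  (cs.map (fun c => (PySem.Int.ofChars? [c]).getD 0)).sum

-- the body of A's lucky loop for one yielded prime: appends the yielded tuple (if any) to out
def pvLuckyA (number : Int) (out : List (Int × String × String)) : List (Int × String × String) :=
  let s := PySem.Int.toChars number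
  let lucky_nmb_len : Int := s.length
  let cnt : Int :=
    if PySem.Int.mod lucky_nmb_len 2 ≠ 0 then PySem.Int.floordiv (lucky_nmb_len - 1) 2
    else PySem.Int.floordiv lucky_nmb_len 2
  if cnt ≠ 0 then
    let left_path := PySem.List.slice s none (some cnt)
    let right_path := PySem.List.slice s (some (-cnt)) none
    if pvDigitSum left_path = pvDigitSum right_path then
      out ++ [(number, String.ofList left_path, String.ofList right_path)]
    else out
  else out

def lucky_prime_numbers_generator (n : Int) : List (Int × String × String) :=
  ((PySem.List.pyRange 2 (n + 1) 1).foldl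
    (fun (st : List Int × List (Int × String × String)) num =>
      if pvBreaks st.1 num then st
      else (st.1 ++ [num], pvLuckyA num st.2))
    ([], [])).2

-- ===== PORT B =====
-- is_prime's while loop: d = 2; while d*d <= m: …; d += 1
-- (ported with a fuel counter that only makes the recursion structural; with the fuel
-- pvIsPrime supplies, the fuel-exhausted branch is never reached)
def pvTrialF (m : Int) : Nat → Int → Bool
  | 0, _ => true
  | fuel + 1, d =>
    if d * d ≤ m then
      if PySem.Int.mod m d = 0 then false else pvTrialF m fuel (d + 1)
    else true

def pvIsPrime (m : Int) : Bool := pvTrialF m (m + 1).toNat 2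

-- the digit part of B's loop body
def pvLuckyB (p : Int) : Option (Int × String × String) :=
  let s := PySem.Int.toChars p
  let half : Int := PySem.Int.floordiv (s.length : Int) 2
  if half = 0 then none
  else
    let left := PySem.List.slice s none (some half)
    let right := PySem.List.slice s (some ((s.length : Int) - half)) none
    if pvDigitSum left = pvDigitSum right then some (p, String.ofList left, String.ofList right)
    else none

def lucky_prime_numbers_generator_alt (n : Int) : List (Int × String × String) :=
  (PySem.List.pyRange 2 (n + 1) 1).filterMap
    (fun p => if !pvIsPrime p then none else pvLuckyB p)

-- ===== PRECONDITION & SPEC =====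
def Spec_lucky_prime_numbers_generator (n : Int) (out : List (Int × String × String)) : Prop := out = lucky_prime_numbers_generator_alt n
instance (n : Int) (out : List (Int × String × String)) : Decidable (Spec_lucky_prime_numbers_generator n out) := by unfold Spec_lucky_prime_numbers_generator; infer_instance

-- ===== CLAIM (what is proved, stated in full; the proofs are below) =====
def Claim_equal_lucky_prime_numbers_generator : Prop := ∀ (n : Int), Dom_lucky_prime_numbers_generator n → Spec_lucky_prime_numbers_generator n (lucky_prime_numbers_generator n)

-- ===== LEMMAS AND PROOFS =====

-- A's inner break loop is an existential over the stored primes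
lemma pvBreaks_iff (ps : List Int) (num : Int) :
    pvBreaks ps num = true ↔ ∃ p ∈ ps, p ∣ num := by
  induction ps with
  | nil => simp [pvBreaks]
  | cons p ps ih =>
      simp only [pvBreaks]
      split
      · rename_i h
        simp only [true_iff]
        exact ⟨p, List.mem_cons_self .., (PySem.Int.mod_eq_zero_iff_dvd num p).mp h⟩
      · rename_i h
        rw [ih]
        constructor
        · rintro ⟨q, hq, hd⟩; exact ⟨q, List.mem_cons_of_mem _ hq, hd⟩
        · rintro ⟨q, hq, hd⟩
          rcases List.mem_cons.mp hq with rfl | hq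
          · exact absurd ((PySem.Int.mod_eq_zero_iff_dvd num q).mpr hd) h
          · exact ⟨q, hq, hd⟩

-- B's while loop, characterized (with enough fuel)
lemma pvTrialF_iff (m : Int) : ∀ (fuel : Nat) (d : Int), 2 ≤ d → (m + 1 - d).toNat ≤ fuel →
    (pvTrialF m fuel d = true ↔ ∀ e : Int, d ≤ e → e * e ≤ m → ¬ e ∣ m) := by
  intro fuel
  induction fuel with
  | zero =>
      intro d hd hf
      simp only [pvTrialF, true_iff]
      intro e he hee _
      have h1 : e ≤ e * e := le_mul_of_one_le_left (by omega) (by omega)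
      omega
  | succ fuel ih =>
      intro d hd hf
      rw [pvTrialF]
      by_cases h1 : d * d ≤ m
      · by_cases h2 : PySem.Int.mod m d = 0
        · have hdvd : d ∣ m := (PySem.Int.mod_eq_zero_iff_dvd m d).mp h2
          simp only [if_pos h1, if_pos h2, Bool.false_eq_true, false_iff]
          push Not
          exact ⟨d, le_rfl, h1, hdvd⟩
        · have hnd : ¬ d ∣ m := fun hdvd => h2 ((PySem.Int.mod_eq_zero_iff_dvd m d).mpr hdvd)
          rw [if_pos h1, if_neg h2, ih (d + 1) (by omega) (by omega)]
          constructor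
          · intro hall e hde hee hdvd
            rcases eq_or_lt_of_le hde with rfl | hlt
            · exact hnd hdvd
            · exact hall e (by omega) hee hdvd
          · intro hall e hde hee hdvd
            exact hall e (by omega) hee hdvd
      · simp only [if_neg h1, true_iff]
        intro e he hee _
        have h2 : d * d ≤ e * e := mul_le_mul he he (by omega) (by omega)
        omega

-- B's is_prime is primality (of toNat) on the numbers it is applied to
lemma pvIsPrime_iff (m : Int) (hm : 2 ≤ m) :
    pvIsPrime m = true ↔ Nat.Prime m.toNat := by
  have h2 : (m.toNat : Int) = m := Int.toNat_of_nonneg (by omega)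
  rw [pvIsPrime, pvTrialF_iff m (m + 1).toNat 2 (by norm_num) (by omega), Nat.prime_def_le_sqrt]
  constructor
  · intro hall
    refine ⟨by omega, fun k hk hks hkd => ?_⟩
    have hkk : k * k ≤ m.toNat := Nat.le_sqrt.mp hks
    have hkk' : (k : Int) * (k : Int) ≤ m := by
      have : ((k * k : Nat) : Int) ≤ (m.toNat : Int) := by exact_mod_cast hkk
      push_cast at this; omega
    refine hall (k : Int) (by exact_mod_cast hk) hkk' ?_
    have : ((k : Nat) : Int) ∣ ((m.toNat : Nat) : Int) := Int.natCast_dvd_natCast.mpr hkd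
    rwa [h2] at this
  · rintro ⟨-, hall⟩ e he hee hed
    have he0 : 0 ≤ e := by omega
    have heq : (e.toNat : Int) = e := Int.toNat_of_nonneg he0
    have hks : e.toNat ≤ Nat.sqrt m.toNat := by
      refine Nat.le_sqrt.mpr ?_
      have : ((e.toNat * e.toNat : Nat) : Int) ≤ (m.toNat : Int) := by
        push_cast; rw [heq, h2]; exact hee
      exact_mod_cast this
    refine hall e.toNat (by omega) hks ?_
    rw [← Int.natCast_dvd_natCast, heq, h2]
    exact hed

-- a number ≥ 2 is composite iff some smaller prime divides it
lemma exists_smaller_prime_dvd (num : Int) (hnum : 2 ≤ num) :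
    (∃ p, 2 ≤ p ∧ p < num ∧ pvIsPrime p = true ∧ p ∣ num) ↔ ¬ Nat.Prime num.toNat := by
  constructor
  · rintro ⟨p, hp2, hplt, hpp, hpd⟩ hprime
    have hp' : Nat.Prime p.toNat := (pvIsPrime_iff p hp2).mp hpp
    have hd : p.toNat ∣ num.toNat := by
      rw [← Int.natCast_dvd_natCast, Int.toNat_of_nonneg (by omega : (0:Int) ≤ p),
        Int.toNat_of_nonneg (by omega : (0:Int) ≤ num)]
      exact hpd
    rcases hprime.eq_one_or_self_of_dvd _ hd with h1 | h1
    · omega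
    · omega
  · intro hnp
    have hk1 : num.toNat ≠ 1 := by omega
    have hkp : Nat.Prime num.toNat.minFac := Nat.minFac_prime hk1
    have hkd : num.toNat.minFac ∣ num.toNat := Nat.minFac_dvd _
    have hkle : num.toNat.minFac ≤ num.toNat := Nat.le_of_dvd (by omega) hkd
    have hklt : num.toNat.minFac < num.toNat := by
      rcases lt_or_eq_of_le hkle with h | h
      · exact h
      · exact absurd (h ▸ hkp) hnp
    have hk2 : 2 ≤ num.toNat.minFac := hkp.two_le
    refine ⟨(num.toNat.minFac : Int), by exact_mod_cast hk2, by omega, ?_, ?_⟩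
    · rw [pvIsPrime_iff _ (by exact_mod_cast hk2)]
      simpa using hkp
    · have := Int.natCast_dvd_natCast.mpr hkd
      rwa [Int.toNat_of_nonneg (by omega : (0:Int) ≤ num)] at this

-- digit parts agree: A's cnt equals B's len // 2 and the negative slice is the tail slice
lemma pvLuckyA_eq (num : Int) (out : List (Int × String × String)) :
    pvLuckyA num out = out ++ (pvLuckyB num).toList := by
  simp only [pvLuckyA, pvLuckyB]
  set s := PySem.Int.toChars num with hs
  have hmod : PySem.Int.mod (s.length : Int) 2 = (s.length : Int) % 2 := by
    simp [pysem]
  have hfd1 : PySem.Int.floordiv ((s.length : Int) - 1) 2 = ((s.length : Int) - 1) / 2 := by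
    simp [pysem]
  have hfd2 : PySem.Int.floordiv (s.length : Int) 2 = (s.length : Int) / 2 := by
    simp [pysem]
  have hcnt :
      (if PySem.Int.mod (s.length : Int) 2 ≠ 0 then PySem.Int.floordiv ((s.length : Int) - 1) 2
        else PySem.Int.floordiv (s.length : Int) 2) = (s.length : Int) / 2 := by
    rw [hmod, hfd1, hfd2]
    split <;> omega
  rw [hcnt, hfd2]
  by_cases h0 : (s.length : Int) / 2 = 0
  · simp [h0]
  · have hhalf : 0 < (s.length : Int) / 2 := by omega
    have hle : (s.length : Int) / 2 ≤ (s.length : Int) := by omega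
    simp only [if_pos h0, if_neg h0]
    have hright :
        PySem.List.slice s (some (-((s.length : Int) / 2))) none
          = PySem.List.slice s (some ((s.length : Int) - (s.length : Int) / 2)) none := by
      rw [PySem.List.slice_some_none, PySem.List.slice_some_none]
      congr 1
      simp only [PySem.List.clampIdx]
      split_ifs <;> omega
    rw [hright]
    split <;> simp

-- the loop invariant
lemma pvLoop (j : Nat) :
    (PySem.List.pyRange 2 (2 + (j : Int)) 1).foldl
      (fun (st : List Int × List (Int × String × String)) num =>
        if pvBreaks st.1 num then st
        else (st.1 ++ [num], pvLuckyA num st.2))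
      ([], [])
    = ((PySem.List.pyRange 2 (2 + (j : Int)) 1).filter (fun p => pvIsPrime p),
       (PySem.List.pyRange 2 (2 + (j : Int)) 1).filterMap
         (fun p => if !pvIsPrime p then none else pvLuckyB p)) := by
  induction j with
  | zero => simp [PySem.List.pyRange_one_eq_nil (by norm_num : (2:Int) ≤ 2)]
  | succ j ih =>
      have hcast : (2 + ((j + 1 : Nat) : Int)) = (2 + (j : Int)) + 1 := by push_cast; ring
      rw [hcast, PySem.List.pyRange_one_succ_right (by omega : (2:Int) ≤ 2 + (j : Int)),
        List.foldl_append, ih, List.filter_append, List.filterMap_append]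
      set num : Int := 2 + (j : Int) with hnumdef
      have hnum : 2 ≤ num := by omega
      simp only [List.foldl_cons, List.foldl_nil, List.filter_cons, List.filter_nil,
        List.filterMap_cons, List.filterMap_nil]
      by_cases hbr : pvBreaks ((PySem.List.pyRange 2 num 1).filter (fun p => pvIsPrime p)) num = true
      · have hnp : ¬ Nat.Prime num.toNat := by
          rw [← exists_smaller_prime_dvd num hnum]
          rcases (pvBreaks_iff _ _).mp hbr with ⟨p, hp, hpd⟩
          rw [List.mem_filter] at hp
          have hpr := (PySem.List.mem_pyRange_one).mp hp.1
          exact ⟨p, hpr.1, hpr.2, hp.2, hpd⟩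
        have hprime : pvIsPrime num = false := by
          rcases Bool.eq_false_or_eq_true (pvIsPrime num) with h | h
          · exact absurd ((pvIsPrime_iff num hnum).mp h) hnp
          · exact h
        rw [if_pos hbr, Prod.mk.injEq]
        exact ⟨by simp [hprime], by simp [hprime]⟩
      · have hprime : pvIsPrime num = true := by
          by_contra hf
          have hnp : ¬ Nat.Prime num.toNat := by
            intro hp
            exact hf ((pvIsPrime_iff num hnum).mpr hp)
          rcases (exists_smaller_prime_dvd num hnum).mpr hnp with ⟨p, hp2, hplt, hpp, hpd⟩
          refine hbr ((pvBreaks_iff _ _).mpr ⟨p, ?_, hpd⟩)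
          exact List.mem_filter.mpr ⟨(PySem.List.mem_pyRange_one).mpr ⟨hp2, hplt⟩, hpp⟩
        rw [if_neg hbr, Prod.mk.injEq]
        refine ⟨by simp [hprime], ?_⟩
        simp only [hprime, Bool.not_true, Bool.false_eq_true, if_false]
        rw [pvLuckyA_eq]
        cases pvLuckyB num <;> simp

-- ===== VERDICT (by name: the statement is the Claim_ definition above) =====
theorem lucky_prime_numbers_generator_spec : Claim_equal_lucky_prime_numbers_generator := by
  intro n _
  unfold Spec_lucky_prime_numbers_generator lucky_prime_numbers_generator lucky_prime_numbers_generator_alt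
  by_cases hn : n + 1 ≤ 2
  · rw [PySem.List.pyRange_one_eq_nil hn]; rfl
  · have h2 : (2:Int) ≤ n + 1 := by omega
    have hj : n + 1 = 2 + ((n - 1).toNat : Int) := by omega
    rw [hj, pvLoop]
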